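-- pv_equiv track=rewrite | github.com/tomatophobia/backjoon | 1904.py | f
-- ===== SOURCE A (Python) =====
-- def f(a, b, res):
--     if a == 0 and b == 0:
--         return res
--     if a == 0:
--         # 무조건 1
--         next = res[:]
--         if len(res) == 0:
--             next.append("1")
--         else:
--             next[0] += "1"
--         return f(a, b - 1, next)
--     elif b == 0:
--         # 무조건 00
--         next = res[:]
--         if len(res) == 0:
--             next.append("00")
--         else:
--             next[0] += "00"
--         return f(a - 1, b, next)
--     else:
--         # 두 가지 모두
--         next = res[:]
--         if len(res) == 0:
--             next.append("1")
--         else: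
--             next[0] += "1"
--         x = f(a, b - 1, next)
--         next = res[:]
--         if len(res) == 0:
--             next.append("00")
--         else:
--             next[0] += "00"
--         y = f(a - 1, b, next)
--         return x + y
-- ===== SOURCE B (Python) =====
-- def f(a, b, res):
--     if a == 0 and b == 0:
--         return res
--     out = []
--     stack = [(a, b, "")]
--     while stack:
--         x, y, s = stack.pop()
--         if x == 0 and y == 0:
--             if len(res) == 0:
--                 out.append(s)
--             else:
--                 out.append(res[0] + s)
--                 out.extend(res[1:])
--         else:
--             if x > 0:
--                 stack.append((x - 1, y, s + "00"))
--             if y > 0: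
--                 stack.append((x, y - 1, s + "1"))
--     return out
-- ===== Notes on version B (the rewrite author's own statement) =====
-- stated objective: alternative
-- what changed: Replaces A's recursive branching (which copies res and mutates its head at every level, recursing on three cases) by an iterative DFS over an explicit stack of (remaining-00, remaining-1, suffix) nodes that builds each arrangement string once and applies the res-prepending only at the leaves.
import Mathlib
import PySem

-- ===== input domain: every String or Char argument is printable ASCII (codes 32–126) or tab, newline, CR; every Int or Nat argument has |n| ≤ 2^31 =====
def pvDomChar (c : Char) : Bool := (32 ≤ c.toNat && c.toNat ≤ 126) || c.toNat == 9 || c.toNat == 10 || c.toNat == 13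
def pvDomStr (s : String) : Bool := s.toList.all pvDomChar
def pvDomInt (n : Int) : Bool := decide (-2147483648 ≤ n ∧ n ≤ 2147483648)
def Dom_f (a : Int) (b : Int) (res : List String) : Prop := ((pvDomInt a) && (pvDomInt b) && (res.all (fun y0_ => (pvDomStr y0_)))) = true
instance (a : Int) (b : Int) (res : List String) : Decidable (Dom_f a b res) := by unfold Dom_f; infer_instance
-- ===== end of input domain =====

-- B replaces A's recursive branching by an iterative DFS with an explicit stack; same cost, different structure (objective: alternative).

-- ===== PORT A =====
-- `next = res[:] ; if len(res)==0: next.append(t) else: next[0] += t` (A does this in each branch)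
def bumpA (res : List String) (t : String) : List String :=
  match res with
  | [] => [t]
  | r :: rs => (r ++ t) :: rs

-- A's recursion diverges when a or b is negative (those inputs are excluded by Pre_f);
-- the fuel a.toNat + b.toNat + 1 always suffices on Pre_f, so this is A's recursion made total.
def fAux (fuel : Nat) (a : Int) (b : Int) (res : List String) : List String :=
  match fuel with
  | 0 => res
  | fuel + 1 =>
    if a = 0 ∧ b = 0 then res
    else if a = 0 then
      fAux fuel a (b - 1) (bumpA res "1")
    else if b = 0 then
      fAux fuel (a - 1) b (bumpA res "00")
    else
      let x := fAux fuel a (b - 1) (bumpA res "1")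
      let y := fAux fuel (a - 1) b (bumpA res "00")
      x ++ y

def f (a : Int) (b : Int) (res : List String) : List String :=
  fAux (a.toNat + b.toNat + 1) a b res

-- ===== PORT B =====
-- the leaf step: `out.append(s)` resp. `out.append(res[0]+s); out.extend(res[1:])`
def leafB (res : List String) (s : String) : List String :=
  match res with
  | [] => [s]
  | r :: rs => (r ++ s) :: rs

-- termination measure for the while loop: each node weighs 3^(x.toNat+y.toNat)
def nodeW (n : Int × Int × String) : Nat := 3 ^ (n.1.toNat + n.2.1.toNat)
def stackW (st : List (Int × Int × String)) : Nat := (st.map nodeW).sum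

theorem stackW_cons (n : Int × Int × String) (st : List (Int × Int × String)) :
    stackW (n :: st) = nodeW n + stackW st := by
  simp [stackW]

theorem loopB_dec₁ (x y : Int) (s s' : String) (rest : List (Int × Int × String))
    (hx : ¬ x > 0) (hy : y > 0) :
    stackW ((x, y - 1, s') :: rest) < stackW ((x, y, s) :: rest) := by
  simp only [stackW_cons, nodeW]
  have hx0 : x.toNat = 0 := by omega
  simp only [hx0, Nat.zero_add]
  have h1 : (y - 1).toNat + 1 = y.toNat := by omega
  have : (3:Nat) ^ (y - 1).toNat < 3 ^ y.toNat := by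
    rw [← h1]; exact Nat.pow_lt_pow_right (by norm_num) (by omega)
  omega

theorem loopB_dec₂ (x y : Int) (s s' : String) (rest : List (Int × Int × String))
    (hx : x > 0) (hy : ¬ y > 0) :
    stackW ((x - 1, y, s') :: rest) < stackW ((x, y, s) :: rest) := by
  simp only [stackW_cons, nodeW]
  have : (3:Nat) ^ ((x - 1).toNat + y.toNat) < 3 ^ (x.toNat + y.toNat) := by
    apply Nat.pow_lt_pow_right (by norm_num); omega
  omega

theorem loopB_dec₃ (x y : Int) (s s1 s2 : String) (rest : List (Int × Int × String))
    (hx : x > 0) (hy : y > 0) :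
    stackW ((x, y - 1, s1) :: (x - 1, y, s2) :: rest) < stackW ((x, y, s) :: rest) := by
  simp only [stackW_cons, nodeW]
  have h1 : (x - 1).toNat + y.toNat + 1 = x.toNat + y.toNat := by omega
  have e : (3:Nat) ^ (x.toNat + y.toNat) = 3 * 3 ^ ((x - 1).toNat + y.toNat) := by
    rw [← h1, pow_succ]; ring
  have e2 : (3:Nat) ^ (x.toNat + (y - 1).toNat) = 3 ^ ((x - 1).toNat + y.toNat) := by
    congr 1; omega
  have hp : 0 < (3:Nat) ^ ((x - 1).toNat + y.toNat) := Nat.pow_pos (by norm_num)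
  omega

theorem loopB_dec₀ (x y : Int) (s : String) (rest : List (Int × Int × String)) :
    stackW rest < stackW ((x, y, s) :: rest) := by
  simp only [stackW_cons, nodeW]
  have : 0 < (3:Nat) ^ (x.toNat + y.toNat) := Nat.pow_pos (by norm_num)
  omega

-- the `while stack:` loop of B (pop the top node, emit a leaf or push the children, '1' child on top)
def loopB (res : List String) (stack : List (Int × Int × String)) (out : List String) :
    List String :=
  match stack with
  | [] => out
  | (x, y, s) :: rest =>
    if x = 0 ∧ y = 0 then
      loopB res rest (out ++ leafB res s)
    else if hx : x > 0 then
      if hy : y > 0 then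
        loopB res ((x, y - 1, s ++ "1") :: (x - 1, y, s ++ "00") :: rest) out
      else
        loopB res ((x - 1, y, s ++ "00") :: rest) out
    else if hy : y > 0 then
      loopB res ((x, y - 1, s ++ "1") :: rest) out
    else
      loopB res rest out
  termination_by stackW stack
  decreasing_by
  · exact loopB_dec₀ x y s rest
  · exact loopB_dec₃ x y s _ _ rest hx hy
  · exact loopB_dec₂ x y s _ rest hx hy
  · exact loopB_dec₁ x y s _ rest hx hy
  · exact loopB_dec₀ x y s rest

def f_alt (a : Int) (b : Int) (res : List String) : List String :=
  if a = 0 ∧ b = 0 then res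
  else loopB res [(a, b, "")] []

-- ===== PRECONDITION & SPEC =====
-- Pre_f excludes negative a or b, on which Python A recurses without end (RecursionError).
def Pre_f (a : Int) (b : Int) (res : List String) : Prop := 0 ≤ a ∧ 0 ≤ b
instance (a : Int) (b : Int) (res : List String) : Decidable (Pre_f a b res) := by
  unfold Pre_f; infer_instance
def pvWitness_f : Int × Int × List String := (2, 2, ["x"])

def Spec_f (a : Int) (b : Int) (res : List String) (out : List String) : Prop := out = f_alt a b res
instance (a : Int) (b : Int) (res : List String) (out : List String) : Decidable (Spec_f a b res out) := by unfold Spec_f; infer_instance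

-- ===== CLAIM (what is proved, stated in full; the proofs are below) =====
def Claim_equal_f : Prop := ∀ (a : Int) (b : Int) (res : List String), Dom_f a b res → Pre_f a b res → Spec_f a b res (f a b res)

-- ===== LEMMAS AND PROOFS =====

-- the arrangements of a '00' tiles and b '1' tiles, in A's DFS ('1' first) order
def arr : Nat → Nat → List String
  | 0, 0 => [""]
  | 0, b + 1 => (arr 0 b).map (fun t => "1" ++ t)
  | a + 1, 0 => (arr a 0).map (fun t => "00" ++ t)
  | a + 1, b + 1 =>
      (arr (a + 1) b).map (fun t => "1" ++ t) ++ (arr a (b + 1)).map (fun t => "00" ++ t)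

theorem arr_os (b : Nat) : arr 0 (b + 1) = (arr 0 b).map (fun t => "1" ++ t) := by
  rw [arr]

theorem arr_so (a : Nat) : arr (a + 1) 0 = (arr a 0).map (fun t => "00" ++ t) := by
  rw [arr]

theorem arr_ss (a b : Nat) : arr (a + 1) (b + 1) =
    (arr (a + 1) b).map (fun t => "1" ++ t) ++ (arr a (b + 1)).map (fun t => "00" ++ t) := by
  rw [arr]

theorem leafB_leafB (res : List String) (t s : String) :
    leafB (leafB res t) s = leafB res (t ++ s) := by
  cases res <;> simp [leafB, String.append_assoc]

theorem bumpA_eq_leafB (res : List String) (t : String) : bumpA res t = leafB res t := rfl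

theorem flatMap_map' {α β γ : Type} (l : List α) (g : α → β) (f : β → List γ) :
    (l.map g).flatMap f = l.flatMap (fun t => f (g t)) := by
  simp [List.flatMap_map]

-- A computes, besides the a = b = 0 identity case, the flatMap of the leaf step over arr
theorem fAux_eq_arr : ∀ (fuel a b : Nat) (res : List String), a + b ≤ fuel →
    fAux fuel (a : Int) (b : Int) res =
      if a = 0 ∧ b = 0 then res else (arr a b).flatMap (leafB res) := by
  intro fuel
  induction fuel with
  | zero =>
    intro a b res h
    have ha : a = 0 := by omega
    have hb : b = 0 := by omega
    subst ha; subst hb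
    simp [fAux]
  | succ n ih =>
    intro a b res h
    match a, b with
    | 0, 0 => simp [fAux]
    | 0, b + 1 =>
      show fAux (n+1) ((0:Nat) : Int) ((b+1 : Nat) : Int) res = _
      rw [fAux]
      rw [if_neg (show ¬(((0:Nat) : Int) = 0 ∧ ((b+1:Nat) : Int) = 0) by push_cast; omega),
          if_pos (show ((0:Nat) : Int) = 0 by push_cast)]
      rw [show (((b+1:Nat) : Int) - 1) = ((b : Nat) : Int) by push_cast; ring]
      rw [ih 0 b _ (by omega), bumpA_eq_leafB]
      rw [if_neg (show ¬((0:Nat) = 0 ∧ b + 1 = 0) by omega)]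
      by_cases hb : b = 0
      · subst hb
        rw [if_pos ⟨rfl, rfl⟩]
        simp [arr_os, arr]
      · rw [if_neg (by omega)]
        rw [arr_os, flatMap_map']
        congr 1
        funext t
        rw [leafB_leafB]
    | a + 1, 0 =>
      show fAux (n+1) ((a+1:Nat) : Int) ((0:Nat) : Int) res = _
      rw [fAux]
      rw [if_neg (show ¬(((a+1:Nat) : Int) = 0 ∧ ((0:Nat) : Int) = 0) by push_cast; omega),
          if_neg (show ¬((a+1:Nat) : Int) = 0 by push_cast; omega),
          if_pos (show ((0:Nat) : Int) = 0 by push_cast)]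
      rw [show (((a+1:Nat) : Int) - 1) = ((a : Nat) : Int) by push_cast; ring]
      rw [ih a 0 _ (by omega), bumpA_eq_leafB]
      rw [if_neg (show ¬(a + 1 = 0 ∧ (0:Nat) = 0) by omega)]
      by_cases ha : a = 0
      · subst ha
        rw [if_pos ⟨rfl, rfl⟩]
        simp [arr_so, arr]
      · rw [if_neg (by omega)]
        rw [arr_so, flatMap_map']
        congr 1
        funext t
        rw [leafB_leafB]
    | a + 1, b + 1 =>
      show fAux (n+1) ((a+1:Nat) : Int) ((b+1 : Nat) : Int) res = _
      rw [fAux]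
      rw [if_neg (show ¬(((a+1:Nat) : Int) = 0 ∧ ((b+1:Nat) : Int) = 0) by push_cast; omega),
          if_neg (show ¬((a+1:Nat) : Int) = 0 by push_cast; omega),
          if_neg (show ¬((b+1:Nat) : Int) = 0 by push_cast; omega)]
      show fAux n ((a+1:Nat) : Int) (((b+1:Nat) : Int) - 1) (bumpA res "1") ++
           fAux n (((a+1:Nat) : Int) - 1) ((b+1:Nat) : Int) (bumpA res "00") = _
      rw [show (((b+1:Nat) : Int) - 1) = ((b : Nat) : Int) by push_cast; ring,
          show (((a+1:Nat) : Int) - 1) = ((a : Nat) : Int) by push_cast; ring]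
      rw [ih (a+1) b _ (by omega), ih a (b+1) _ (by omega), bumpA_eq_leafB, bumpA_eq_leafB]
      rw [if_neg (show ¬(a + 1 = 0 ∧ b = 0) by omega),
          if_neg (show ¬(a = 0 ∧ b + 1 = 0) by omega),
          if_neg (show ¬(a + 1 = 0 ∧ b + 1 = 0) by omega)]
      rw [arr_ss, List.flatMap_append, flatMap_map', flatMap_map']
      congr 1
      · congr 1; funext t; rw [leafB_leafB]
      · congr 1; funext t; rw [leafB_leafB]

-- the leaves contributed by one stack node
def subtree (res : List String) (n : Int × Int × String) : List String :=
  (arr n.1.toNat n.2.1.toNat).flatMap (fun t => leafB res (n.2.2 ++ t))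

theorem subtree_zero (res : List String) (s : String) :
    subtree res (0, 0, s) = leafB res s := by
  simp [subtree, arr]

theorem subtree_branch (res : List String) (x y : Int) (s : String)
    (hx : 0 < x) (hy : 0 < y) :
    subtree res (x, y, s) =
      subtree res (x, y - 1, s ++ "1") ++ subtree res (x - 1, y, s ++ "00") := by
  simp only [subtree]
  rw [show x.toNat = (x - 1).toNat + 1 by omega, show y.toNat = (y - 1).toNat + 1 by omega]
  rw [arr_ss, List.flatMap_append, flatMap_map', flatMap_map']
  congr 1 <;> (congr 1; funext t; rw [String.append_assoc])

theorem subtree_left (res : List String) (x : Int) (s : String) (hx : 0 < x) :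
    subtree res (x, 0, s) = subtree res (x - 1, 0, s ++ "00") := by
  simp only [subtree]
  rw [show x.toNat = (x - 1).toNat + 1 by omega]
  rw [show (Int.toNat 0) = 0 from rfl, arr_so, flatMap_map']
  congr 1; funext t; rw [String.append_assoc]

theorem subtree_right (res : List String) (y : Int) (s : String) (hy : 0 < y) :
    subtree res (0, y, s) = subtree res (0, y - 1, s ++ "1") := by
  simp only [subtree]
  rw [show y.toNat = (y - 1).toNat + 1 by omega]
  rw [show (Int.toNat 0) = 0 from rfl, arr_os, flatMap_map']
  congr 1; funext t; rw [String.append_assoc]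

-- B's loop computes out ++ the concatenation of the subtree leaves of the stack nodes
theorem loopB_eq : ∀ (N : Nat) (res : List String) (stack : List (Int × Int × String)),
    stackW stack ≤ N →
    (∀ n ∈ stack, 0 ≤ n.1 ∧ 0 ≤ n.2.1) →
    ∀ out, loopB res stack out = out ++ stack.flatMap (subtree res) := by
  intro N
  induction N with
  | zero =>
    intro res stack hW _ out
    match stack with
    | [] => simp [loopB]
    | (x, y, s) :: rest =>
      exfalso
      have := loopB_dec₀ x y s rest
      omega
  | succ N ih =>
    intro res stack hW hpos out
    match stack with
    | [] => simp [loopB]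
    | (x, y, s) :: rest =>
      have hx : 0 ≤ x := (hpos _ (List.mem_cons_self ..)).1
      have hy : 0 ≤ y := (hpos _ (List.mem_cons_self ..)).2
      have hrest : ∀ n ∈ rest, 0 ≤ n.1 ∧ 0 ≤ n.2.1 :=
        fun n hn => hpos n (List.mem_cons_of_mem _ hn)
      rw [loopB]
      by_cases h0 : x = 0 ∧ y = 0
      · rw [if_pos h0]
        rw [ih res rest (by have := loopB_dec₀ x y s rest; omega) hrest]
        obtain ⟨hx0, hy0⟩ := h0; subst hx0; subst hy0
        simp [subtree_zero, List.append_assoc]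
      · rw [if_neg h0]
        by_cases hxp : x > 0
        · rw [dif_pos hxp]
          by_cases hyp : y > 0
          · rw [dif_pos hyp]
            rw [ih res _ (by have := loopB_dec₃ x y s (s ++ "1") (s ++ "00") rest hxp hyp; omega)
                  (by
                    intro n hn
                    simp only [List.mem_cons] at hn
                    rcases hn with h | h | h
                    · subst h; constructor <;> simp <;> omega
                    · subst h; constructor <;> simp <;> omega
                    · exact hrest n h)]
            simp [subtree_branch res x y s hxp hyp, List.append_assoc]
          · rw [dif_neg hyp]
            have hy0 : y = 0 := by omega
            subst hy0
            rw [ih res _ (by have := loopB_dec₂ x 0 s (s ++ "00") rest hxp hyp; omega)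
                  (by
                    intro n hn
                    simp only [List.mem_cons] at hn
                    rcases hn with h | h
                    · subst h; constructor <;> simp <;> omega
                    · exact hrest n h)]
            simp [subtree_left res x s hxp]
        · rw [dif_neg hxp]
          have hx0 : x = 0 := by omega
          subst hx0
          have hyp : y > 0 := by
            rcases lt_or_eq_of_le hy with h | h
            · exact h
            · exact absurd ⟨rfl, h.symm⟩ h0
          rw [dif_pos hyp]
          rw [ih res _ (by have := loopB_dec₁ 0 y s (s ++ "1") rest hxp hyp; omega)
                (by
                  intro n hn
                  simp only [List.mem_cons] at hn
                  rcases hn with h | h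
                  · subst h; constructor <;> simp <;> omega
                  · exact hrest n h)]
          simp [subtree_right res y s hyp]

theorem f_eq_f_alt (a b : Int) (ha : 0 ≤ a) (hb : 0 ≤ b) (res : List String) :
    f a b res = f_alt a b res := by
  by_cases h0 : a = 0 ∧ b = 0
  · obtain ⟨h1, h2⟩ := h0; subst h1; subst h2
    simp [f, fAux, f_alt]
  · unfold f f_alt
    rw [if_neg h0]
    have ea : ((a.toNat : Nat) : Int) = a := by omega
    have eb : ((b.toNat : Nat) : Int) = b := by omega
    rw [show fAux (a.toNat + b.toNat + 1) a b res =
          fAux (a.toNat + b.toNat + 1) ((a.toNat : Nat) : Int) ((b.toNat : Nat) : Int) res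
        from by rw [ea, eb]]
    rw [fAux_eq_arr _ _ _ _ (by omega)]
    rw [if_neg (by omega)]
    rw [loopB_eq (stackW [(a, b, "")]) res _ (le_refl _)
          (by intro n hn; simp only [List.mem_cons] at hn
              rcases hn with h | h
              · subst h; exact ⟨ha, hb⟩
              · simp at h)]
    simp [subtree, String.empty_append]

-- ===== VERDICT (by name: the statement is the Claim_ definition above) =====
theorem f_spec : Claim_equal_f := by
  intro a b res _ hpre
  unfold Spec_f
  exact f_eq_f_alt a b hpre.1 hpre.2 res
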